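-- pv_equiv track=rewrite | github.com/Apekis/AppleRAG | backend/chunking/chunkers.py | structure_chunk_text
-- ===== SOURCE A (Python) =====
-- def structure_chunk_text(text):
--     """
--     Splits text into chunks based on detected headings (e.g., CHAPTER, section numbers).
--     """
--     lines = text.split("\n")
--     chunks = []
--     current_chunk = []
--
--     heading_tags = ('\h1','\h2','\h3','\h4','\h5','\h6')
--     for line in lines:
--         if any(heading in (line.strip()) for heading in heading_tags) and current_chunk:
--             chunks.append("\n".join(current_chunk))
--             current_chunk = [line]
--         else:
--             current_chunk.append(line)
--     if current_chunk:
--         chunks.append("\n".join(current_chunk))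
--     return chunks
-- ===== SOURCE B (Python) =====
-- def structure_chunk_text(text):
--     """
--     Splits text into chunks based on detected headings (e.g., CHAPTER, section numbers).
--     Index-then-slice decomposition: compute all boundary indices first, then join slices.
--     """
--     lines = text.split("\n")
--     heading_tags = ('\h1', '\h2', '\h3', '\h4', '\h5', '\h6')
--     bounds = [0] + [i for i in range(1, len(lines))
--                     if any(tag in lines[i].strip() for tag in heading_tags)]
--     bounds.append(len(lines))
--     return ["\n".join(lines[a:b]) for a, b in zip(bounds, bounds[1:])]
-- ===== Notes on version B (the rewrite author's own statement) =====
-- stated objective: alternative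
-- what changed: B first computes the list of chunk boundary indices (0, every line index >= 1 whose stripped text contains a heading tag, and len(lines)) and then joins the consecutive slices, replacing A's accumulate-and-flush loop with index computation plus slicing.
import Mathlib
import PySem

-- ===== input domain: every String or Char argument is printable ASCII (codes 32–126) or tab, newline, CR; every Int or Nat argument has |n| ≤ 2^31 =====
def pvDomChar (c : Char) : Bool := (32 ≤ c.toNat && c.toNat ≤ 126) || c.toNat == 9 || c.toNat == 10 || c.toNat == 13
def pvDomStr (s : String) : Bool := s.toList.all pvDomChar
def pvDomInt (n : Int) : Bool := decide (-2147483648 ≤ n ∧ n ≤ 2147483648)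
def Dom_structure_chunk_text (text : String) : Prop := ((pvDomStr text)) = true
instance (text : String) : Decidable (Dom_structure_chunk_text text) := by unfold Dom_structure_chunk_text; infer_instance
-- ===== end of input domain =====

-- ===== PORT A =====
-- B re-chunks by boundary indices + slicing instead of A's accumulate-and-flush loop (objective: alternative decomposition).
-- shared helper: the heading test 'any(heading in line.strip() for heading in heading_tags)', identical in both Pythons
def pvHeadLine (line : List Char) : Bool :=
  ["\\h1", "\\h2", "\\h3", "\\h4", "\\h5", "\\h6"].any
    (fun h => PySem.Chars.isIn h.toList (PySem.Chars.strip line))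

-- the body of A's for-loop (state = (chunks, current_chunk))
def pvStepA (st : List (List Char) × List (List Char)) (line : List Char) :
    List (List Char) × List (List Char) :=
  if pvHeadLine line && !st.2.isEmpty then
    (st.1 ++ [PySem.Chars.join ['\n'] st.2], [line])
  else
    (st.1, st.2 ++ [line])

-- A's trailing 'if current_chunk: chunks.append(...)'
def pvFlushA (st : List (List Char) × List (List Char)) : List (List Char) :=
  if !st.2.isEmpty then st.1 ++ [PySem.Chars.join ['\n'] st.2] else st.1

def structure_chunk_text (text : String) : List String :=
  let lines := PySem.Chars.splitOn text.toList ['\n']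
  (pvFlushA (lines.foldl pvStepA ([], []))).map String.ofList

-- ===== PORT B =====
def structure_chunk_text_alt (text : String) : List String :=
  let lines := PySem.Chars.splitOn text.toList ['\n']
  let n : Int := PySem.List.len lines
  let bounds := (0 : Int) ::
    (PySem.List.pyRange 1 n 1).filter (fun i => pvHeadLine (PySem.List.pyGetD lines i [])) ++ [n]
  (bounds.zip bounds.tail).map
    (fun p => String.ofList (PySem.Chars.join ['\n'] (PySem.List.slice lines (some p.1) (some p.2))))

-- ===== PRECONDITION & SPEC =====
def Spec_structure_chunk_text (text : String) (out : List String) : Prop := out = structure_chunk_text_alt text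
instance (text : String) (out : List String) : Decidable (Spec_structure_chunk_text text out) := by unfold Spec_structure_chunk_text; infer_instance

-- ===== CLAIM (what is proved, stated in full; the proofs are below) =====
def Claim_equal_structure_chunk_text : Prop := ∀ (text : String), Dom_structure_chunk_text text → Spec_structure_chunk_text text (structure_chunk_text text)

-- ===== LEMMAS AND PROOFS =====

-- A's chunking loop, written as structural recursion over the remaining lines (current chunk nonempty)
def pvGo (cur : List (List Char)) : List (List Char) → List (List (List Char))
  | [] => [cur]
  | l :: ls => if pvHeadLine l then cur :: pvGo [l] ls else pvGo (cur ++ [l]) ls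

lemma pvGo_ne_nil (cur : List (List Char)) (ls : List (List Char)) : pvGo cur ls ≠ [] := by
  induction ls generalizing cur with
  | nil => simp [pvGo]
  | cons l ls ih => simp only [pvGo]; split <;> simp [ih]

lemma pvSplitOn_go_ne_nil (sep : List Char) (fuel : Nat) (l cur : List Char)
    (acc : List (List Char)) : PySem.Chars.splitOn.go sep fuel l cur acc ≠ [] := by
  induction fuel generalizing l cur acc with
  | zero => simp [PySem.Chars.splitOn.go]
  | succ fuel ih =>
    cases l with
    | nil => simp [PySem.Chars.splitOn.go]
    | cons c rest =>
      rw [PySem.Chars.splitOn.go]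
      split
      · exact ih _ _ _
      · exact ih _ _ _

lemma pvSplitOn_ne_nil (s sep : List Char) : PySem.Chars.splitOn s sep ≠ [] := by
  unfold PySem.Chars.splitOn; exact pvSplitOn_go_ne_nil _ _ _ _ _

-- A's foldl with nonempty current chunk computes pvGo
lemma pvA_loop (rest : List (List Char)) (ch cur : List (List Char)) (hcur : cur ≠ []) :
    pvFlushA (rest.foldl pvStepA (ch, cur))
    = ch ++ (pvGo cur rest).map (PySem.Chars.join ['\n']) := by
  induction rest generalizing ch cur with
  | nil => simp [pvFlushA, pvGo, hcur]
  | cons l ls ih =>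
    simp only [List.foldl_cons, pvGo]
    cases h : pvHeadLine l with
    | true =>
      rw [show pvStepA (ch, cur) l = (ch ++ [PySem.Chars.join ['\n'] cur], [l]) by
        simp [pvStepA, h, hcur]]
      rw [ih _ [l] (by simp)]
      simp
    | false =>
      rw [show pvStepA (ch, cur) l = (ch, cur ++ [l]) by simp [pvStepA, h]]
      rw [ih _ (cur ++ [l]) (by simp)]
      simp

-- Nat-level boundary list and partition (what B computes, after casting away the Ints)
def pvF (lines : List (List Char)) : List Nat :=
  ((List.range (lines.length - 1)).map (· + 1)).filter
        (fun k => pvHeadLine (lines.getD k []))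

def pvBoundsN (lines : List (List Char)) : List Nat :=
  (0 :: pvF lines) ++ [lines.length]

def pvPartsN (lines : List (List Char)) : List (List (List Char)) :=
  ((pvBoundsN lines).zip (pvBoundsN lines).tail).map
    (fun p => ((lines.drop p.1).take (p.2 - p.1)))

lemma pvPairs_append_singleton {α : Type} (xs : List α) (b : α) (h : xs ≠ []) :
    ((xs ++ [b]).zip (xs ++ [b]).tail) = (xs.zip xs.tail) ++ [(xs.getLast h, b)] := by
  induction xs with
  | nil => exact absurd rfl h
  | cons x xs ih =>
    cases xs with
    | nil => simp
    | cons y ys =>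
      simp only [List.cons_append, List.zip_cons_cons, List.tail_cons]
      rw [show (y :: (ys ++ [b])).zip (ys ++ [b]) = ((y :: ys) ++ [b]).zip ((y :: ys) ++ [b]).tail
            by simp]
      rw [ih (by simp)]
      simp [List.getLast]

lemma pvGo_append (l : List Char) (xs : List (List Char)) (cur : List (List Char)) :
    pvGo cur (xs ++ [l]) =
      if pvHeadLine l then pvGo cur xs ++ [[l]]
      else (pvGo cur xs).dropLast ++ [(pvGo cur xs).getLastD [] ++ [l]] := by
  induction xs generalizing cur with
  | nil => cases h : pvHeadLine l <;> simp [pvGo, h]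
  | cons x xs ih =>
    simp only [List.cons_append, pvGo]
    cases hx : pvHeadLine x with
    | true =>
      simp only [if_true, ih [x]]
      cases h : pvHeadLine l with
      | true => simp
      | false =>
        simp only [Bool.false_eq_true, if_false]
        rw [List.dropLast_cons_of_ne_nil (pvGo_ne_nil _ _)]
        rw [show ((pvGo [x] xs).getLastD [] : List (List Char)) = (cur :: pvGo [x] xs).getLastD []
              from ?_]
        · simp
        · cases hg : pvGo [x] xs with
          | nil => exact absurd hg (pvGo_ne_nil _ _)
          | cons a t => simp
    | false =>
      simp only [Bool.false_eq_true, if_false, ih (cur ++ [x])]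

lemma pvF_mem_lt (lines : List (List Char)) (x : Nat) (hx : x ∈ 0 :: pvF lines) :
    x < lines.length ∨ (x = 0 ∧ lines.length = 0) := by
  simp only [pvF, List.mem_cons, List.mem_filter, List.mem_map, List.mem_range] at hx
  rcases hx with rfl | ⟨⟨k, hk, rfl⟩, -⟩ <;> omega

lemma pvBoundsN_mem_le (lines : List (List Char)) (x : Nat) (hx : x ∈ pvBoundsN lines) :
    x ≤ lines.length := by
  simp only [pvBoundsN, List.mem_append, List.mem_singleton] at hx
  rcases hx with h | rfl
  · rcases pvF_mem_lt lines x h with h | ⟨rfl, -⟩ <;> omega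
  · exact le_refl _

lemma pvGetD_concat (lines : List (List Char)) (l d : List Char) :
    (lines ++ [l]).getD lines.length d = l := by
  simp [List.getD]

-- one more line appended: the boundary list grows by that line's boundary (if heading) and the new end
lemma pvF_step (l0 l : List Char) (ls : List (List Char)) :
    pvF ((l0 :: ls) ++ [l]) =
      pvF (l0 :: ls) ++ (if pvHeadLine l then [(l0 :: ls).length] else []) := by
  unfold pvF
  rw [show ((l0 :: ls) ++ [l]).length - 1 = ls.length + 1 by simp,
    show (l0 :: ls).length - 1 = ls.length by simp,
    List.range_succ, List.map_append, List.filter_append]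
  congr 1
  · apply List.filter_congr
    intro k hk
    simp only [List.mem_map, List.mem_range] at hk
    obtain ⟨j, hj, rfl⟩ := hk
    rw [List.getD_append _ _ _ _ (by simp; omega)]
  · simp only [List.map_cons, List.map_nil, List.filter_cons, List.filter_nil]
    rw [show ls.length + 1 = (l0 :: ls).length by simp, pvGetD_concat]

lemma pvSlice_congr_append (lines : List (List Char)) (l : List Char) (a b : Nat)
    (hb : b ≤ lines.length) :
    ((lines ++ [l]).drop a).take (b - a) = (lines.drop a).take (b - a) := by
  rcases le_or_gt a lines.length with ha | ha
  · rw [List.drop_append_of_le_length ha, List.take_append_of_le_length (by simp; omega)]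
  · rw [show b - a = 0 by omega]
    simp

lemma pvPartsN_eq_pvGo (l0 : List Char) (ls : List (List Char)) :
    pvPartsN (l0 :: ls) = pvGo [l0] ls := by
  induction ls using List.reverseRecOn with
  | nil => simp [pvPartsN, pvBoundsN, pvF, pvGo]
  | append_singleton ls l ih =>
    have hcons : l0 :: (ls ++ [l]) = (l0 :: ls) ++ [l] := by simp
    rw [hcons, pvGo_append, ← ih]
    have hslice : ∀ p ∈ (pvBoundsN (l0 :: ls)).zip (pvBoundsN (l0 :: ls)).tail,
        ((((l0 :: ls) ++ [l]).drop p.1).take (p.2 - p.1)) =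
          (((l0 :: ls).drop p.1).take (p.2 - p.1)) := by
      intro p hp
      obtain ⟨h1, h2⟩ := List.of_mem_zip hp
      exact pvSlice_congr_append _ _ _ _ (pvBoundsN_mem_le _ _ (List.mem_of_mem_tail h2))
    cases h : pvHeadLine l with
    | true =>
      rw [if_pos rfl]
      have hb : pvBoundsN ((l0 :: ls) ++ [l]) = pvBoundsN (l0 :: ls) ++ [(l0 :: ls).length + 1] := by
        unfold pvBoundsN
        rw [pvF_step, h]
        simp
      unfold pvPartsN
      rw [hb, pvPairs_append_singleton _ _ (by simp [pvBoundsN]),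
        show (pvBoundsN (l0 :: ls)).getLast (by simp [pvBoundsN]) = (l0 :: ls).length from
          List.getLast_concat, List.map_append]
      rw [List.map_congr_left hslice]
      congr 1
      simp only [List.map_cons, List.map_nil]
      rw [List.drop_append_of_le_length (le_refl _)]
      simp
    | false =>
      rw [if_neg (by simp)]
      have hb : pvBoundsN ((l0 :: ls) ++ [l]) = (0 :: pvF (l0 :: ls)) ++ [(l0 :: ls).length + 1] := by
        unfold pvBoundsN
        rw [pvF_step, h]
        simp
      have hlast : ∀ c : Nat, ((0 :: pvF (l0 :: ls)) ++ [c]).zip (((0 :: pvF (l0 :: ls)) ++ [c])).tail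
          = ((0 :: pvF (l0 :: ls)).zip (0 :: pvF (l0 :: ls)).tail)
            ++ [((0 :: pvF (l0 :: ls)).getLast (by simp), c)] := fun c =>
        pvPairs_append_singleton _ _ (by simp)
      obtain hg := pvF_mem_lt (l0 :: ls) ((0 :: pvF (l0 :: ls)).getLast (by simp))
        (List.getLast_mem _)
      rcases hg with hg | ⟨-, habs⟩
      swap
      · simp at habs
      set g := (0 :: pvF (l0 :: ls)).getLast (by simp) with hgdef
      have hpairs0 : ∀ p ∈ (0 :: pvF (l0 :: ls)).zip (0 :: pvF (l0 :: ls)).tail,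
          ((((l0 :: ls) ++ [l]).drop p.1).take (p.2 - p.1)) =
            (((l0 :: ls).drop p.1).take (p.2 - p.1)) := by
        intro p hp
        obtain ⟨h1, h2⟩ := List.of_mem_zip hp
        rcases pvF_mem_lt (l0 :: ls) p.2 (List.mem_of_mem_tail h2) with h' | ⟨-, habs⟩
        · exact pvSlice_congr_append _ _ _ _ (le_of_lt h')
        · simp at habs
      unfold pvPartsN
      rw [hb, hlast, List.map_append, List.map_congr_left hpairs0]
      conv_rhs => rw [show pvBoundsN (l0 :: ls) = (0 :: pvF (l0 :: ls)) ++ [(l0 :: ls).length]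
        from rfl, hlast, List.map_append]
      simp only [List.map_cons, List.map_nil]
      rw [List.dropLast_concat, List.getLastD_concat]
      congr 1
      rw [List.drop_append_of_le_length (le_of_lt hg)]
      have hg' : g < ls.length + 1 := by simpa using hg
      rw [List.take_of_length_le (by simp; omega), List.take_of_length_le (by simp)]

-- B computes the Nat-level partition
lemma pvAlt_filter (L : List (List Char)) :
    (PySem.List.pyRange 1 (PySem.List.len L) 1).filter
        (fun i => pvHeadLine (PySem.List.pyGetD L i []))
      = (pvF L).map (fun k : Nat => (k : Int)) := by
  unfold pvF
  rw [PySem.List.pyRange_one, List.filter_map, List.filter_map, List.map_map]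
  rw [show ((PySem.List.len L : Int) - 1).toNat = L.length - 1 by
    simp only [PySem.List.len_eq]; omega]
  simp only [Function.comp_def]
  congr 1
  · funext k
    push_cast
    ring
  · apply List.filter_congr
    intro k hk
    rw [show (1 : Int) + (k : Int) = ((k + 1 : Nat) : Int) by push_cast; ring,
      PySem.List.pyGetD_natCast]

lemma pvAlt_core (L : List (List Char)) :
    ((((0 : Int) ::
        (PySem.List.pyRange 1 (PySem.List.len L) 1).filter
          (fun i => pvHeadLine (PySem.List.pyGetD L i [])) ++ [PySem.List.len L]).zip
      (((0 : Int) ::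
        (PySem.List.pyRange 1 (PySem.List.len L) 1).filter
          (fun i => pvHeadLine (PySem.List.pyGetD L i [])) ++ [PySem.List.len L]).tail)).map
       (fun p => String.ofList (PySem.Chars.join ['\n'] (PySem.List.slice L (some p.1) (some p.2)))))
    = (pvPartsN L).map (fun c => String.ofList (PySem.Chars.join ['\n'] c)) := by
  simp only [pvPartsN]
  have hb : (((0 : Int) :: (PySem.List.pyRange 1 (PySem.List.len L) 1).filter
        (fun i => pvHeadLine (PySem.List.pyGetD L i []))) ++ [PySem.List.len L])
      = (pvBoundsN L).map (fun k : Nat => (k : Int)) := by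
    rw [pvAlt_filter]
    simp [pvBoundsN]
  rw [hb]
  rw [show ((pvBoundsN L).map (fun k : Nat => (k : Int))).tail
      = ((pvBoundsN L).tail.map (fun k : Nat => (k : Int))) from List.map_tail.symm]
  rw [List.zip_map, List.map_map, List.map_map]
  apply List.map_congr_left
  intro p hp
  simp only [Function.comp_apply, Prod.map_fst, Prod.map_snd]
  rw [PySem.List.slice_natCast]

-- B computes the Nat-level partition
lemma pvAlt_eq_partsN (text : String) :
    structure_chunk_text_alt text =
      (pvPartsN (PySem.Chars.splitOn text.toList ['\n'])).map
        (fun c => String.ofList (PySem.Chars.join ['\n'] c)) :=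
  pvAlt_core _

-- ===== VERDICT (by name: the statement is the Claim_ definition above) =====
theorem structure_chunk_text_spec : Claim_equal_structure_chunk_text := by
  intro text _
  unfold Spec_structure_chunk_text
  rw [pvAlt_eq_partsN]
  unfold structure_chunk_text
  cases hsplit : PySem.Chars.splitOn text.toList ['\n'] with
  | nil => exact absurd hsplit (pvSplitOn_ne_nil _ _)
  | cons l0 ls =>
    simp only [List.foldl_cons]
    rw [show pvStepA ([], []) l0 = ([], [l0]) by simp [pvStepA]]
    rw [pvA_loop ls [] [l0] (by simp)]
    rw [pvPartsN_eq_pvGo]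
    simp [Function.comp]
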